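-- pv_equiv track=rewrite | github.com/teoocolo/esercizi_python | Esercizio1.py | competizione_con_piu_giudici
-- ===== SOURCE A (Python) =====
-- def competizione_con_piu_giudici(tupla_competizioni):
--     max=0
--     array=[]
--     for chef, piatto, punti, giudici in tupla_competizioni:
--         if(giudici==max):
--             tupla=(chef, piatto, punti, giudici)
--             array.append(tupla)
--         if(giudici>max):
--             array=[]
--             max=giudici
--             tupla=(chef, piatto, punti, giudici)
--             array.append(tupla)
--
--     return array
-- ===== SOURCE B (Python) =====
-- def competizione_con_piu_giudici(tupla_competizioni):
--     m = 0
--     for chef, piatto, punti, giudici in tupla_competizioni: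
--         if giudici > m:
--             m = giudici
--     return [(chef, piatto, punti, giudici)
--             for chef, piatto, punti, giudici in tupla_competizioni
--             if giudici == m]
-- ===== Notes on version B (the rewrite author's own statement) =====
-- stated objective: simpler
-- what changed: Replaces the single pass that rebuilds the accumulator on every new maximum with a two-pass decomposition: one pass computing the threshold max(0, max giudici), then one comprehension collecting the matching tuples in order.
import Mathlib
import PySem

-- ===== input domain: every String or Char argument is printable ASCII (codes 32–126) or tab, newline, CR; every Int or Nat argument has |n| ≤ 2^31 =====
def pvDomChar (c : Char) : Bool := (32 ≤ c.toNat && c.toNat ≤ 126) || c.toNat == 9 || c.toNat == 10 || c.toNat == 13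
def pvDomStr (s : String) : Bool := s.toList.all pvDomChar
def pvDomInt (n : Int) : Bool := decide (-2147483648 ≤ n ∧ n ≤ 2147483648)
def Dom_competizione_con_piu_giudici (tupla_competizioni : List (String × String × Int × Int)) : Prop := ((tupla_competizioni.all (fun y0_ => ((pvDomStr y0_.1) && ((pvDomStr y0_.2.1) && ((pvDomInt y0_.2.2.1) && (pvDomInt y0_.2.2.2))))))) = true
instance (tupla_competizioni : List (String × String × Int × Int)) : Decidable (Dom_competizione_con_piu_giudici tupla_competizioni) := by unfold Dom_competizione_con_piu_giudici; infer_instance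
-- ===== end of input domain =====

-- B replaces A's reset-the-accumulator-on-new-maximum single pass by a two-pass
-- decomposition (threshold first, then collect); objective: simpler, same cost.

-- ===== PORT A =====
-- the loop of A: state is the running max and the accumulator array, in that order
def pvALoop : List (String × String × Int × Int) → Int → List (String × String × Int × Int) → List (String × String × Int × Int)
  | [], _, array => array
  | (chef, piatto, punti, giudici) :: rest, max, array =>
    let array1 := if giudici = max then array ++ [(chef, piatto, punti, giudici)] else array
    if giudici > max then pvALoop rest giudici [(chef, piatto, punti, giudici)]
    else pvALoop rest max array1

def competizione_con_piu_giudici (tupla_competizioni : List (String × String × Int × Int)) : List (String × String × Int × Int) :=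
  pvALoop tupla_competizioni 0 []

-- ===== PORT B =====
def competizione_con_piu_giudici_alt (tupla_competizioni : List (String × String × Int × Int)) : List (String × String × Int × Int) :=
  let m := tupla_competizioni.foldl (fun m x => if x.2.2.2 > m then x.2.2.2 else m) 0
  tupla_competizioni.filterMap (fun x =>
    match x with
    | (chef, piatto, punti, giudici) =>
      if giudici = m then some (chef, piatto, punti, giudici) else none)

-- ===== PRECONDITION & SPEC =====
def Spec_competizione_con_piu_giudici (tupla_competizioni : List (String × String × Int × Int)) (out : List (String × String × Int × Int)) : Prop := out = competizione_con_piu_giudici_alt tupla_competizioni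
instance (tupla_competizioni : List (String × String × Int × Int)) (out : List (String × String × Int × Int)) : Decidable (Spec_competizione_con_piu_giudici tupla_competizioni out) := by unfold Spec_competizione_con_piu_giudici; infer_instance

-- ===== CLAIM (what is proved, stated in full; the proofs are below) =====
def Claim_equal_competizione_con_piu_giudici : Prop := ∀ (tupla_competizioni : List (String × String × Int × Int)), Dom_competizione_con_piu_giudici tupla_competizioni → Spec_competizione_con_piu_giudici tupla_competizioni (competizione_con_piu_giudici tupla_competizioni)

-- ===== LEMMAS AND PROOFS =====

-- the final maximum, starting from m
def pvFmax (l : List (String × String × Int × Int)) (m : Int) : Int :=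
  l.foldl (fun m x => if x.2.2.2 > m then x.2.2.2 else m) m

-- the collected entries for threshold M
def pvSel (l : List (String × String × Int × Int)) (M : Int) : List (String × String × Int × Int) :=
  l.filterMap (fun x =>
    match x with
    | (chef, piatto, punti, giudici) =>
      if giudici = M then some (chef, piatto, punti, giudici) else none)

theorem pvFmax_ge (l : List (String × String × Int × Int)) (m : Int) : m ≤ pvFmax l m := by
  induction l generalizing m with
  | nil => simp [pvFmax]
  | cons x l ih =>
    simp only [pvFmax, List.foldl_cons]
    by_cases h : x.2.2.2 > m
    · simp only [if_pos h]; exact le_of_lt (lt_of_lt_of_le h (ih _))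
    · simp only [if_neg h]; exact ih m

theorem pvALoop_eq (l : List (String × String × Int × Int)) (m : Int) (arr : List (String × String × Int × Int)) :
    pvALoop l m arr = (if pvFmax l m = m then arr else []) ++ pvSel l (pvFmax l m) := by
  induction l generalizing m arr with
  | nil => simp [pvALoop, pvFmax, pvSel]
  | cons x l ih =>
    obtain ⟨chef, piatto, punti, giudici⟩ := x
    have hfm : pvFmax ((chef, piatto, punti, giudici) :: l) m
        = pvFmax l (if giudici > m then giudici else m) := by
      simp [pvFmax]
    by_cases hgt : giudici > m
    · have hne : giudici ≠ m := ne_of_gt hgt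
      simp only [pvALoop, if_neg hne, if_pos hgt]
      rw [ih]
      have hM : pvFmax ((chef, piatto, punti, giudici) :: l) m = pvFmax l giudici := by
        rw [hfm, if_pos hgt]
      rw [hM]
      have hMm : pvFmax l giudici ≠ m :=
        ne_of_gt (lt_of_lt_of_le hgt (pvFmax_ge l giudici))
      rw [if_neg hMm]
      by_cases hG : giudici = pvFmax l giudici
      · simp [pvSel, ← hG]
      · simp [pvSel, hG, Ne.symm hG]
    · have hM : pvFmax ((chef, piatto, punti, giudici) :: l) m = pvFmax l m := by
        rw [hfm, if_neg hgt]
      by_cases heq : giudici = m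
      · simp only [pvALoop, if_pos heq, if_neg hgt]
        rw [ih, hM]
        by_cases hMm : pvFmax l m = m
        · simp [pvSel, heq, hMm]
        · have : m ≠ pvFmax l m := fun h => hMm h.symm
          simp [pvSel, if_neg hMm, heq, this]
      · simp only [pvALoop, if_neg heq, if_neg hgt]
        rw [ih, hM]
        have hgM : giudici ≠ pvFmax l m := by
          have : giudici < m := lt_of_le_of_ne (not_lt.mp hgt) heq
          exact ne_of_lt (lt_of_lt_of_le this (pvFmax_ge l m))
        simp [pvSel, hgM]

-- ===== VERDICT (by name: the statement is the Claim_ definition above) =====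
theorem competizione_con_piu_giudici_spec : Claim_equal_competizione_con_piu_giudici := by
  intro t _
  show pvALoop t 0 [] = _
  rw [pvALoop_eq]
  simp only [competizione_con_piu_giudici_alt]
  split <;> simp [pvSel, pvFmax]
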